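-- pv_equiv track=rewrite | github.com/nagi930/coding_test | 2020_03_07_programmers_더 맵게.py | solution
-- ===== SOURCE A (Python) =====
-- import heapq
--
-- def solution(scoville, K):
--     heapq.heapify(scoville)
--     count = 0
--
--     # if all(food > K for food in scoville):
--     #     return count
--
--     while len(scoville) > 1:
--         first = heapq.heappop(scoville)
--         heapq.heappush(scoville, first + heapq.heappop(scoville) * 2)
--         count += 1
--         if all(food > K for food in scoville):
--             return count
--
--     return -1
-- ===== SOURCE B (Python) =====
-- def solution(scoville, K):
--     # Two-queue Huffman technique: sort once, then merged values are consumed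
--     # from a FIFO queue; the pool minimum is always one of the two queue heads,
--     # so no heap and no per-step ordered insertion or full all() scan is needed.
--     foods = sorted(scoville)
--     merged = []
--     i, j, count = 0, 0, 0
--
--     def next_is_food(i, j):
--         return i < len(foods) and (j >= len(merged) or foods[i] <= merged[j])
--
--     while (len(foods) - i) + (len(merged) - j) > 1:
--         if next_is_food(i, j):
--             first, i = foods[i], i + 1
--         else:
--             first, j = merged[j], j + 1
--         if next_is_food(i, j):
--             second, i = foods[i], i + 1
--         else:
--             second, j = merged[j], j + 1
--         merged.append(first + second * 2)
--         count += 1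
--         if (foods[i] if next_is_food(i, j) else merged[j]) > K:
--             return count
--     return -1
-- ===== Notes on version B (the rewrite author's own statement) =====
-- stated objective: faster
-- what changed: Replaces the heap with the two-queue merge technique: sort once, keep merged values in a FIFO queue consumed by two index pointers (merged results are provably appended in an order that keeps the queue sorted), so each step is O(1) head comparisons instead of heappop/heappush sifting, and the all() scan becomes a single head test.
import Mathlib
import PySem

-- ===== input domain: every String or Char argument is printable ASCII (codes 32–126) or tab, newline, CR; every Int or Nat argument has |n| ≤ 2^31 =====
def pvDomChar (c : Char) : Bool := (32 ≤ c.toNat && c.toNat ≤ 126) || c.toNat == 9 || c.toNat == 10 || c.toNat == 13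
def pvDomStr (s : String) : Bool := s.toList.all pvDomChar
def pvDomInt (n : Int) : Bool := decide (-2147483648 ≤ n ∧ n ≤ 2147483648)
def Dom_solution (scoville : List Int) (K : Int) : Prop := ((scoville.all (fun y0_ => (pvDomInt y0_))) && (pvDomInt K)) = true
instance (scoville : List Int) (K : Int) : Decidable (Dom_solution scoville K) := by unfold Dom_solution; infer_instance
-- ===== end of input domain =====

-- B replaces the heap with the two-queue merge technique (sort once; merged values go
-- into a FIFO queue read off by a pointer; the pool minimum is always one of the two
-- queue heads).  Equivalence is about the RETURN value only: Python A mutates the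
-- scoville argument in place (heapify/pop/push), B does not.

-- ===== PORT A =====
-- The calls into the heapq library are ported by their documented min-priority-queue
-- semantics: heappop returns and removes the smallest element, heappush adds an element,
-- heapify reorders the list in place.  This is exact for solution's RETURN value, which
-- depends only on the multiset of the heap's contents (duplicate minima are equal Ints).
def heappopA (heap : List Int) : Int × List Int :=
  match PySem.List.min? heap (fun x => x) with
  | some m => (m, heap.erase m)
  | none => (0, [])          -- unreachable: heappop is only called with len(heap) > 1

-- length after one pop (cited by the termination proof of loopA)
theorem heappopA_length (heap : List Int) (h : heap ≠ []) :
    (heappopA heap).2.length = heap.length - 1 := by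
  rcases hm : PySem.List.min? heap (fun x => x) with _ | m
  · exact absurd (((PySem.List.min?_eq_none_iff heap (fun x => x)).mp hm)) h
  · simp [heappopA, hm, List.length_erase_of_mem (PySem.List.min?_mem hm)]

-- the while loop of A
def loopA (K : Int) (heap : List Int) (count : Int) : Int :=
  if h : 1 < heap.length then
    let p1 := heappopA heap
    let p2 := heappopA p1.2
    let heap2 := p2.2 ++ [p1.1 + p2.1 * 2]        -- heappush(heap, first + heappop(heap) * 2)
    let count2 := count + 1
    if heap2.all (fun food => K < food) then count2
    else loopA K heap2 count2
  else -1
termination_by heap.length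
decreasing_by
  have h1 : (heappopA heap).2.length = heap.length - 1 :=
    heappopA_length heap (by intro hnil; simp [hnil] at h)
  have h2 : (heappopA (heappopA heap).2).2.length = (heappopA heap).2.length - 1 :=
    heappopA_length _ (by intro hnil; rw [hnil] at h1; simp at h1; omega)
  simp only [List.length_append, List.length_cons, List.length_nil, h2, h1]
  omega

def solution (scoville : List Int) (K : Int) : Int :=
  loopA K scoville 0          -- heapify leaves the contents unchanged as a multiset

-- ===== PORT B =====
-- Source B's index pointers i into foods and j into merged are represented by the
-- suffixes F = foods[i:] and M = merged[j:]; merged.append(m) is M ++ [m].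

-- next_is_food(i, j):  i < len(foods) and (j >= len(merged) or foods[i] <= merged[j])
def nextIsFood (F M : List Int) : Bool :=
  !F.isEmpty && (M.isEmpty || decide (F.headD 0 ≤ M.headD 0))

-- the if/else pair that pops first (and then second) in Source B
def popMin (F M : List Int) : Int × List Int × List Int :=
  if nextIsFood F M then (F.headD 0, F.tail, M) else (M.headD 0, F, M.tail)

-- the conditional expression  foods[i] if next_is_food(i, j) else merged[j]
def headMin (F M : List Int) : Int :=
  if nextIsFood F M then F.headD 0 else M.headD 0

-- total length after one pop (cited by the termination proof of loopB)
theorem popMin_length (F M : List Int) (h : ¬(F = [] ∧ M = [])) :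
    (popMin F M).2.1.length + (popMin F M).2.2.length = F.length + M.length - 1 := by
  rcases F with _ | ⟨a, F'⟩ <;> rcases M with _ | ⟨b, M'⟩ <;>
    simp [popMin, nextIsFood] at h ⊢ <;> split <;> simp <;> omega

-- the while loop of Source B
def loopB (K : Int) (F M : List Int) (count : Int) : Int :=
  if h : 1 < F.length + M.length then
    let p1 := popMin F M
    let p2 := popMin p1.2.1 p1.2.2
    let F2 := p2.2.1
    let M3 := p2.2.2 ++ [p1.1 + p2.1 * 2]
    let count2 := count + 1
    if K < headMin F2 M3 then count2
    else loopB K F2 M3 count2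
  else -1
termination_by F.length + M.length
decreasing_by
  have h1 : (popMin F M).2.1.length + (popMin F M).2.2.length = F.length + M.length - 1 :=
    popMin_length F M (by rintro ⟨rfl, rfl⟩; simp at h)
  have h2 : (popMin (popMin F M).2.1 (popMin F M).2.2).2.1.length
      + (popMin (popMin F M).2.1 (popMin F M).2.2).2.2.length
      = (popMin F M).2.1.length + (popMin F M).2.2.length - 1 :=
    popMin_length _ _ (by rintro ⟨e1, e2⟩; rw [e1, e2] at h1; simp at h1; omega)
  simp only [List.length_append, List.length_cons, List.length_nil]
  omega

def solution_alt (scoville : List Int) (K : Int) : Int :=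
  loopB K (PySem.List.sorted scoville (fun x => x) false) [] 0

-- ===== PRECONDITION & SPEC =====
def Spec_solution (scoville : List Int) (K : Int) (out : Int) : Prop := out = solution_alt scoville K
instance (scoville : List Int) (K : Int) (out : Int) : Decidable (Spec_solution scoville K out) := by unfold Spec_solution; infer_instance

-- ===== CLAIM (what is proved, stated in full; the proofs are below) =====
def Claim_equal_solution : Prop := ∀ (scoville : List Int) (K : Int), Dom_solution scoville K → Spec_solution scoville K (solution scoville K)

-- ===== LEMMAS AND PROOFS =====

-- the merged queue only loses elements across a pop
theorem popMin_M_subset (F M : List Int) : ∀ x ∈ (popMin F M).2.2, x ∈ M := by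
  unfold popMin
  split
  · intro x hx; exact hx
  · intro x hx; exact List.mem_of_mem_tail hx

-- The loop invariant InvTQ F M: both queues are sorted, and every merged element is at
-- most three times any element that was still in either queue when it was appended
-- (each merged element is f + 2*s for two pops f ≤ s that were minima at that time).
def InvTQ (F M : List Int) : Prop :=
  F.Pairwise (· ≤ ·) ∧ M.Pairwise (· ≤ ·) ∧
  (∀ m ∈ M, ∀ x ∈ F, m ≤ 3 * x) ∧
  M.Pairwise (fun a b => b ≤ 3 * a)

-- one pop: the value is the pool minimum, the pool loses exactly that element,
-- the invariant survives, and every surviving merged element is ≤ 3 * popped value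
theorem popMin_spec (F M : List Int) (hI : InvTQ F M) (hne : ¬(F = [] ∧ M = [])) :
    (popMin F M).1 ∈ F ++ M ∧
    (∀ x ∈ F ++ M, (popMin F M).1 ≤ x) ∧
    (F ++ M).erase (popMin F M).1 = (popMin F M).2.1 ++ (popMin F M).2.2 ∧
    InvTQ (popMin F M).2.1 (popMin F M).2.2 ∧
    (∀ m ∈ (popMin F M).2.2, m ≤ 3 * (popMin F M).1) := by
  obtain ⟨hF, hM, hFM, hMM⟩ := hI
  by_cases hn : nextIsFood F M = true
  · -- pops the head of F
    rcases F with _ | ⟨a, F'⟩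
    · simp [nextIsFood] at hn
    have hF' := List.pairwise_cons.mp hF
    refine ⟨?_, ?_, ?_, ?_, ?_⟩
    · simp [popMin, hn]
    · intro x hx
      simp only [popMin, hn, if_pos, List.headD_cons]
      rcases List.mem_append.mp hx with hxa | hxm
      · rcases List.mem_cons.mp hxa with rfl | hxa
        · exact le_refl _
        · exact hF'.1 x hxa
      · -- a ≤ M.head ≤ x  via nextIsFood and sortedness of M
        rcases M with _ | ⟨b, M'⟩
        · simp at hxm
        have hab : a ≤ b := by
          simp [nextIsFood] at hn; exact hn
        rcases List.mem_cons.mp hxm with rfl | hxm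
        · exact hab
        · exact le_trans hab ((List.pairwise_cons.mp hM).1 x hxm)
    · simp [popMin, hn]
    · exact ⟨by simp [popMin, hn, hF'.2], by simp [popMin, hn, hM],
        by simp only [popMin, hn, if_pos]; exact fun m hm x hx => hFM m hm x (List.mem_cons_of_mem a hx),
        by simp [popMin, hn, hMM]⟩
    · intro m hm
      simp only [popMin, hn, if_pos, List.headD_cons] at hm ⊢
      exact hFM m hm a List.mem_cons_self
  · -- pops the head of M
    rcases M with _ | ⟨b, M'⟩
    · rcases F with _ | ⟨a, F'⟩
      · exact absurd ⟨rfl, rfl⟩ hne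
      · simp [nextIsFood] at hn
    have hM' := List.pairwise_cons.mp hM
    have hbF : ∀ x ∈ F, b < x := by
      intro x hx
      rcases F with _ | ⟨a, F'⟩
      · simp at hx
      have hba : b < a := by
        simp [nextIsFood] at hn; exact hn
      rcases List.mem_cons.mp hx with rfl | hx
      · exact hba
      · exact lt_of_lt_of_le hba ((List.pairwise_cons.mp hF).1 x hx)
    refine ⟨?_, ?_, ?_, ?_, ?_⟩
    · simp [popMin, hn]
    · intro x hx
      simp only [popMin, hn, if_neg, Bool.false_eq_true, not_false_iff, List.headD_cons]
      rcases List.mem_append.mp hx with hxa | hxm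
      · exact le_of_lt (hbF x hxa)
      · rcases List.mem_cons.mp hxm with rfl | hxm
        · exact le_refl _
        · exact hM'.1 x hxm
    · have hnb : b ∉ F := fun hb => absurd rfl (ne_of_gt (hbF b hb))
      simp [popMin, hn, List.erase_append_right _ hnb]
    · refine ⟨by simp [popMin, hn, hF], by simp [popMin, hn, hM'.2], ?_, by
        have := (List.pairwise_cons.mp hMM).2
        simp [popMin, hn, this]⟩
      simp only [popMin, hn, if_neg, Bool.false_eq_true, not_false_iff]
      exact fun m hm x hx => hFM m (List.mem_cons_of_mem b hm) x hx
    · intro m hm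
      simp only [popMin, hn, if_neg, Bool.false_eq_true, not_false_iff, List.headD_cons] at hm ⊢
      exact (List.pairwise_cons.mp hMM).1 m hm

-- popping the abstract heap yields the same value and a permutation of the queues' pool
theorem heappopA_agrees (heap F M : List Int) (hperm : heap.Perm (F ++ M))
    (hI : InvTQ F M) (hne : ¬(F = [] ∧ M = [])) :
    (heappopA heap).1 = (popMin F M).1 ∧
    (heappopA heap).2.Perm ((popMin F M).2.1 ++ (popMin F M).2.2) := by
  obtain ⟨hmem, hmin, herase, _, _⟩ := popMin_spec F M hI hne
  have hne' : heap ≠ [] := by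
    intro hnil; subst hnil
    have := hperm.symm.eq_nil
    rcases F with _ | _ <;> rcases M with _ | _ <;> simp_all
  rcases hm : PySem.List.min? heap (fun x => x) with _ | m
  · exact absurd (((PySem.List.min?_eq_none_iff heap (fun x => x)).mp hm)) hne'
  · have hmmem : m ∈ heap := PySem.List.min?_mem hm
    have heq : m = (popMin F M).1 :=
      le_antisymm (PySem.List.min?_isMin hm _ (hperm.mem_iff.mpr hmem))
        (hmin m (hperm.mem_iff.mp hmmem))
    subst heq
    refine ⟨by simp [heappopA, hm], ?_⟩
    have := (hperm.erase (popMin F M).1)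
    rw [herase] at this
    simpa [heappopA, hm] using this

-- headMin of a sorted nonempty pool is its minimum, so "all > K" is "K < headMin"
theorem all_gt_iff_headMin (K : Int) (F M : List Int) (hI : InvTQ F M)
    (hne : ¬(F = [] ∧ M = [])) :
    ((F ++ M).all (fun food => K < food) = true) ↔ K < headMin F M := by
  obtain ⟨hmem, hmin, _, _, _⟩ := popMin_spec F M hI hne
  have hh : headMin F M = (popMin F M).1 := by
    simp only [headMin, popMin]; split <;> rfl
  rw [hh]
  simp only [List.all_eq_true, decide_eq_true_eq]
  exact ⟨fun h => h _ hmem, fun h x hx => lt_of_lt_of_le h (hmin x hx)⟩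

-- main invariant: A's heap loop equals B's two-queue loop on a permuted pool
theorem loop_eq (K : Int) (heap F M : List Int) (count : Int)
    (hperm : heap.Perm (F ++ M)) (hI : InvTQ F M) :
    loopA K heap count = loopB K F M count := by
  induction hn : heap.length using Nat.strong_induction_on generalizing heap F M count with
  | _ n ih =>
  subst hn
  have hlen : heap.length = F.length + M.length := by
    simpa using hperm.length_eq
  by_cases hgt : 1 < heap.length
  swap
  · rw [loopA, loopB, dif_neg hgt, dif_neg (by omega)]
  rw [loopA, loopB]
  simp only [dif_pos hgt, dif_pos (show 1 < F.length + M.length by omega)]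
  -- first pop
  have hne1 : ¬(F = [] ∧ M = []) := by
    rintro ⟨rfl, rfl⟩
    have h0 : heap.length = 0 := by simpa using hperm.length_eq
    omega
  obtain ⟨hv1, hagree1⟩ := heappopA_agrees heap F M hperm hI hne1
  obtain ⟨_, hmin1, _, hI1, hle1⟩ := popMin_spec F M hI hne1
  -- second pop
  have hlen1 : (heappopA heap).2.length = heap.length - 1 :=
    heappopA_length heap (by intro hnil; simp [hnil] at hgt)
  have hlen1' : (popMin F M).2.1.length + (popMin F M).2.2.length = F.length + M.length - 1 :=
    popMin_length F M hne1
  have hne2 : ¬((popMin F M).2.1 = [] ∧ (popMin F M).2.2 = []) := by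
    rintro ⟨e1, e2⟩; rw [e1, e2] at hlen1'; simp at hlen1'; omega
  obtain ⟨hv2, hagree2⟩ := heappopA_agrees (heappopA heap).2 _ _ hagree1 hI1 hne2
  obtain ⟨_, hmin2, _, hI2, hle2⟩ := popMin_spec _ _ hI1 hne2
  set f := (popMin F M).1 with hf
  set s := (popMin (popMin F M).2.1 (popMin F M).2.2).1 with hs
  set F2 := (popMin (popMin F M).2.1 (popMin F M).2.2).2.1 with hF2
  set M2 := (popMin (popMin F M).2.1 (popMin F M).2.2).2.2 with hM2
  rw [hv1, hv2]
  set m := f + s * 2 with hmdef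
  -- the merged pools stay in step
  have hpermH : ((heappopA (heappopA heap).2).2 ++ [m]).Perm (F2 ++ (M2 ++ [m])) := by
    simpa [List.append_assoc] using hagree2.append_right [m]
  -- the invariant survives the append
  have hI3 : InvTQ F2 (M2 ++ [m]) := by
    obtain ⟨hF2s, hM2s, hFM2, hMM2⟩ := hI2
    have hmemsub1 : ∀ x, x ∈ (popMin F M).2.1 ++ (popMin F M).2.2 → x ∈ F ++ M := by
      intro x hx
      obtain ⟨_, _, herase, _, _⟩ := popMin_spec F M hI hne1
      exact (List.erase_subset (l := F ++ M)) (herase ▸ hx)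
    have hmemsub2 : ∀ x, x ∈ F2 ++ M2 → x ∈ (popMin F M).2.1 ++ (popMin F M).2.2 := by
      intro x hx
      obtain ⟨_, _, herase, _, _⟩ := popMin_spec _ _ hI1 hne2
      exact (List.erase_subset (l := _)) (herase ▸ hx)
    have hfle : ∀ x, x ∈ F2 ++ M2 → f ≤ x := fun x hx => hmin1 x (hmemsub1 x (hmemsub2 x hx))
    have hsle : ∀ x, x ∈ F2 ++ M2 → s ≤ x := fun x hx => hmin2 x (hmemsub2 x hx)
    have hfs : f ≤ s := by
      have : s ∈ (popMin F M).2.1 ++ (popMin F M).2.2 :=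
        (popMin_spec _ _ hI1 hne2).1
      exact hmin1 s (hmemsub1 s this)
    refine ⟨hF2s, ?_, ?_, ?_⟩
    · -- M2 ++ [m] sorted: every L in M2 satisfies L ≤ 3f and L ≤ 3s, hence L ≤ f + 2s
      rw [List.pairwise_append]
      refine ⟨hM2s, List.pairwise_singleton _ _, ?_⟩
      intro L hL _ hy
      rw [List.mem_singleton] at hy; subst hy
      have h3f : L ≤ 3 * f := hle1 L (popMin_M_subset _ _ L hL)
      have h3s : L ≤ 3 * s := hle2 L hL
      omega
    · -- every element of M2 ++ [m] is ≤ 3x for x remaining in F2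
      intro L hL x hx
      rcases List.mem_append.mp hL with hL | hL
      · exact hFM2 L hL x hx
      · rw [List.mem_singleton] at hL; subst hL
        have hfx : f ≤ x := hfle x (List.mem_append_left M2 hx)
        have hsx : s ≤ x := hsle x (List.mem_append_left M2 hx)
        omega
    · -- pairwise (b ≤ 3a) on M2 ++ [m]
      rw [List.pairwise_append]
      refine ⟨hMM2, List.pairwise_singleton _ _, ?_⟩
      intro L hL y hy
      rw [List.mem_singleton] at hy; subst hy
      have hfL : f ≤ L := hfle L (List.mem_append_right F2 hL)
      have hsL : s ≤ L := hsle L (List.mem_append_right F2 hL)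
      omega
  -- the satisfaction tests agree
  have hne3 : ¬(F2 = [] ∧ M2 ++ [m] = []) := by rintro ⟨_, h⟩; simp at h
  have htest : ((((heappopA (heappopA heap).2).2) ++ [m]).all (fun food => K < food) = true)
      ↔ K < headMin F2 (M2 ++ [m]) := by
    rw [hpermH.all_eq]
    exact all_gt_iff_headMin K F2 (M2 ++ [m]) hI3 hne3
  by_cases hK : K < headMin F2 (M2 ++ [m])
  · rw [if_pos (htest.mpr hK), if_pos hK]
  · rw [if_neg (fun h => hK (htest.mp h)), if_neg hK]
    apply ih _ _ _ _ _ _ hpermH hI3 rfl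
    have h2 : (heappopA (heappopA heap).2).2.length = (heappopA heap).2.length - 1 :=
      heappopA_length _ (by intro hnil; rw [hnil] at hlen1; simp at hlen1; omega)
    simp only [List.length_append, List.length_cons, List.length_nil, h2, hlen1]
    omega

-- ===== VERDICT (by name: the statement is the Claim_ definition above) =====
theorem solution_spec : Claim_equal_solution := by
  intro scoville K _
  unfold Spec_solution solution solution_alt
  apply loop_eq K scoville (PySem.List.sorted scoville (fun x => x) false) [] 0
  · simpa using (PySem.List.sorted_perm scoville (fun x => x) false).symm
  · refine ⟨by simpa using PySem.List.sorted_pairwise scoville (fun x => x), by simp, by simp, by simp⟩
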